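-- pv_equiv track=rewrite | github.com/Jangsuji/Algorithm-Study | Advanced/시작하기/이진수.py | hex2bin
-- ===== SOURCE A (Python) =====
-- def hex2bin(hex):
--     bin = []
--     try:
--         for i in range(4):
--             quotient, remainder = int(hex)//2, int(hex)%2
--             bin.append(remainder)
--             hex = quotient
--         aggregation = list(reversed(bin))
--         binary = ''.join(str(e) for e in aggregation)
--         return binary
--     except:
--         if hex =='F':
--             return '1111'
--         elif hex =='E':
--             return '1110'
--         elif hex =='D':
--             return '1101'
--         elif hex =='C':
--             return '1100'
--         elif hex =='B':
--             return '1011'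
--         else:
--             return '1010'
-- ===== SOURCE B (Python) =====
-- _LETTERS = {'F': '1111', 'E': '1110', 'D': '1101', 'C': '1100', 'B': '1011'}
--
-- def hex2bin(hex):
--     try:
--         return format(int(hex) % 16, '04b')
--     except Exception:
--         return _LETTERS.get(hex, '1010')
-- ===== Notes on version B (the rewrite author's own statement) =====
-- stated objective: simpler
-- what changed: Replaces the 4-iteration div/mod loop, list building, reversal and join with a single closed-form 4-digit binary format of int(hex) % 16, and the 5-branch if/elif letter chain with a dict lookup with default.
import Mathlib
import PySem

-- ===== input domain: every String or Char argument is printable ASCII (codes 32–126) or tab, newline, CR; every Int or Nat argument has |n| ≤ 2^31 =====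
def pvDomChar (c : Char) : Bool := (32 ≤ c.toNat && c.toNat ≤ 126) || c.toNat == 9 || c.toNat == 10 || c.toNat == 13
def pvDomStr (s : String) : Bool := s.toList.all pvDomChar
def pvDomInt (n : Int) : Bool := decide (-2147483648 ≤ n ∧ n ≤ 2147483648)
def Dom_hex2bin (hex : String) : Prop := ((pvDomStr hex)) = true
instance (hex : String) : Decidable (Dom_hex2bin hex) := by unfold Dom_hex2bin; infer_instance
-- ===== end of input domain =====

-- B replaces A's 4-iteration div/mod loop + list reversal + join by the closed form
-- format(int(hex) % 16, '04b'), and the if/elif letter chain by a dict lookup with default (objective: simpler).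

-- ===== PORT A =====
def hex2bin (hex : String) : String :=
  match PySem.Int.ofStr? hex with
  | some n0 =>
      -- for i in range(4): quotient, remainder = int(hex)//2, int(hex)%2; bin.append(remainder); hex = quotient
      let st := (PySem.List.pyRange 0 4 1).foldl
        (fun (st : List Int × Int) _ =>
          (st.1 ++ [PySem.Int.mod st.2 2], PySem.Int.floordiv st.2 2)) ([], n0)
      let aggregation := st.1.reverse
      PySem.Str.join "" (aggregation.map PySem.Int.toStr)
  | none =>
      -- except: the first int(hex) raised, so hex is the unchanged argument
      if hex == "F" then "1111"
      else if hex == "E" then "1110"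
      else if hex == "D" then "1101"
      else if hex == "C" then "1100"
      else if hex == "B" then "1011"
      else "1010"

-- ===== PORT B =====
def hex2binLetters : PySem.Dict String String :=
  PySem.Dict.ofList [("F","1111"),("E","1110"),("D","1101"),("C","1100"),("B","1011")]

-- format(m, '04b') ported by hand: the four binary digits of m, high bit first;
-- exact for 0 ≤ m < 16, the only values it receives here (m = n mod 16)
def format04b (m : Int) : String :=
  String.ofList (List.map (fun k => if PySem.Int.mod (PySem.Int.floordiv m k) 2 = 1 then '1' else '0') [8, 4, 2, 1])

def hex2bin_alt (hex : String) : String :=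
  match PySem.Int.ofStr? hex with
  | some n => format04b (PySem.Int.mod n 16)
  | none => PySem.Dict.getD hex2binLetters hex "1010"

-- ===== PRECONDITION & SPEC =====
def Spec_hex2bin (hex : String) (out : String) : Prop := out = hex2bin_alt hex
instance (hex : String) (out : String) : Decidable (Spec_hex2bin hex out) := by unfold Spec_hex2bin; infer_instance

-- ===== CLAIM (what is proved, stated in full; the proofs are below) =====
def Claim_equal_hex2bin : Prop := ∀ (hex : String), Dom_hex2bin hex → Spec_hex2bin hex (hex2bin hex)

-- ===== LEMMAS AND PROOFS =====

-- A's 4-step loop produces exactly the 4 low binary digits of n, i.e. format04b (n mod 16)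
lemma some_case (n : Int) :
    PySem.Str.join ""
      ((((PySem.List.pyRange 0 4 1).foldl
        (fun (st : List Int × Int) _ =>
          (st.1 ++ [PySem.Int.mod st.2 2], PySem.Int.floordiv st.2 2)) ([], n)).1.reverse).map
        PySem.Int.toStr)
    = format04b (PySem.Int.mod n 16) := by
  have hr : PySem.List.pyRange 0 4 1 = [0, 1, 2, 3] := by decide
  rw [hr]
  have fdk : ∀ (a k : Int), 0 < k → PySem.Int.floordiv a k = a / k :=
    fun a k hk => PySem.Int.floordiv_eq_ediv_of_pos hk
  have mdk : ∀ (a k : Int), 0 < k → PySem.Int.mod a k = a % k :=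
    fun a k hk => PySem.Int.mod_eq_emod_of_pos hk
  simp only [List.foldl, format04b, List.map,
    fdk _ 8 (by omega), fdk _ 4 (by omega), fdk _ 2 (by omega), fdk _ 1 (by omega),
    mdk _ 2 (by omega), mdk _ 16 (by omega)]
  have e1 : (n % 16) / 1 % 2 = n % 2 := by omega
  have e2 : (n % 16) / 2 % 2 = (n / 2) % 2 := by omega
  have e4 : (n % 16) / 4 % 2 = (n / 2 / 2) % 2 := by omega
  have e8 : (n % 16) / 8 % 2 = (n / 2 / 2 / 2) % 2 := by omega
  rw [e1, e2, e4, e8]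
  have h0 : n % 2 = 0 ∨ n % 2 = 1 := by omega
  have h1 : (n / 2) % 2 = 0 ∨ (n / 2) % 2 = 1 := by omega
  have h2 : (n / 2 / 2) % 2 = 0 ∨ (n / 2 / 2) % 2 = 1 := by omega
  have h3 : (n / 2 / 2 / 2) % 2 = 0 ∨ (n / 2 / 2 / 2) % 2 = 1 := by omega
  rcases h0 with h0 | h0 <;> rcases h1 with h1 | h1 <;> rcases h2 with h2 | h2 <;> rcases h3 with h3 | h3 <;>
    rw [h0, h1, h2, h3] <;> decide

-- A's if/elif letter chain equals B's dict lookup with default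
lemma none_case (hex : String) :
    (if hex == "F" then "1111"
      else if hex == "E" then "1110"
      else if hex == "D" then "1101"
      else if hex == "C" then "1100"
      else if hex == "B" then "1011"
      else "1010")
    = PySem.Dict.getD hex2binLetters hex "1010" := by
  have h : hex2binLetters.items = [("F","1111"),("E","1110"),("D","1101"),("C","1100"),("B","1011")] := by
    decide
  have hb : ∀ a b : String, (a == b) = decide (b = a) := by
    intro a b; by_cases hab : b = a <;> simp [hab]; exact fun hh => hab hh.symm
  simp only [PySem.Dict.getD, PySem.Dict.get?, h, List.find?]
  split_ifs with h1 h2 h3 h4 h5 <;> simp_all [hb, eq_comm]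

-- ===== VERDICT (by name: the statement is the Claim_ definition above) =====
theorem hex2bin_spec : Claim_equal_hex2bin := by
  intro hex _
  unfold Spec_hex2bin hex2bin hex2bin_alt
  cases h : PySem.Int.ofStr? hex with
  | some n => exact some_case n
  | none => exact none_case hex
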